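-- pv_equiv track=rewrite | github.com/rotem1023/Extended-Introduction-to-Computer-Science | hw6.py | text_fingerprint
-- ===== SOURCE A (Python) =====
-- def fingerprint(text, basis=2 ** 16, r=2 ** 32 - 3):
--     """ used to compute karp-rabin fingerprint of the pattern
--         employs Horner method (modulo r) """
--     partial_sum = 0
--     for ch in text:
--         partial_sum = (partial_sum * basis + ord(ch)) % r
--     return partial_sum
--
-- def text_fingerprint(text, m, basis=2 ** 16, r=2 ** 32 - 3):
--     """ computes karp-rabin fingerprint of the text """
--     f = []
--     b_power = pow(basis, m - 1, r)
--     list.append(f, fingerprint(text[0:m], basis, r))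
--     # f[0] equals first text fingerprint
--     for s in range(1, len(text) - m + 1):
--         new_fingerprint = ((f[s - 1] - ord(text[s - 1]) * b_power) * basis + ord(text[s + m - 1])) % r
--         # compute f[s], based on f[s-1]
--         list.append(f, new_fingerprint)  # append f[s] to existing f
--     return f
-- ===== SOURCE B (Python) =====
-- def text_fingerprint(text, m, basis=2 ** 16, r=2 ** 32 - 3):
--     """ computes karp-rabin fingerprint of the text:
--         each window hashed independently with Horner's method
--         (always at least the first window, like the original) """
--     def horner(window):
--         h = 0
--         for ch in window:
--             h = h * basis + ord(ch)
--         return h % r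
--     return [horner(text[s:s + m]) for s in range(max(1, len(text) - m + 1))]
-- ===== Notes on version B (the rewrite author's own statement) =====
-- stated objective: simpler
-- what changed: B replaces A's rolling f[s]-from-f[s-1] Karp-Rabin recurrence (with a precomputed basis^(m-1) mod r) by hashing each window text[s:s+m] independently from scratch with Horner's method in a single comprehension.
-- outside the precondition, e.g. on text_fingerprint('ab', 0, 3, 7): A returns [0, 0, 0], B returns [0, 0, 0]; on text_fingerprint('ab', 0, 6, 4): A raises ValueError, B returns [0, 0, 0]; on text_fingerprint('ab', 1, 2, 0): A raises ValueError, B raises ZeroDivisionError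
import Mathlib
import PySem

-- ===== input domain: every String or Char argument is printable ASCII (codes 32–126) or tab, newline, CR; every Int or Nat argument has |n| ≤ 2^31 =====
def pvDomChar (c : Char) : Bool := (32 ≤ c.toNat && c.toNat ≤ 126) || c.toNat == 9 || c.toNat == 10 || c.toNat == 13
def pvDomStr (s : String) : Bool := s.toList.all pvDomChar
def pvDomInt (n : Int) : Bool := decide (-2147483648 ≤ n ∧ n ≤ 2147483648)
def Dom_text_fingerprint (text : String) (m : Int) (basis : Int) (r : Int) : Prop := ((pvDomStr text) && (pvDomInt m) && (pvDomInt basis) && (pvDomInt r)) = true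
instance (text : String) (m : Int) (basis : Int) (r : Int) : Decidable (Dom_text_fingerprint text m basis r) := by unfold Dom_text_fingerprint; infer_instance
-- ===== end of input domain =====

-- B hashes every window independently with Horner's method instead of A's rolling
-- recurrence (simpler, one comprehension); return values only, no mutation involved.

-- ===== PORT A =====
-- helper 'fingerprint' of A: Horner hash modulo r
def pvFingerprint (text : List Char) (basis r : Int) : Int :=
  text.foldl (fun ps ch => PySem.Int.mod (ps * basis + (ch.toNat : Int)) r) 0

-- hand port of the builtin pow(b, e, m) for e ≥ 0 (PySem.Int.powMod is extensionally the
-- same but not efficiently evaluable): binary exponentiation, every intermediate reduced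
-- by Python's % (Int.fmod); exact for e ≥ 0 and any m ≠ 0
def pvPowMod (b : Int) (e : Nat) (r : Int) : Int :=
  if h : e = 0 then PySem.Int.mod 1 r
  else
    let p := pvPowMod b (e / 2) r
    let p2 := PySem.Int.mod (p * p) r
    if e % 2 = 0 then p2 else PySem.Int.mod (p2 * b) r
decreasing_by exact Nat.div_lt_self (Nat.pos_of_ne_zero h) (by norm_num)

-- port of A; pow(basis, m-1, r) is ported as pvPowMod above, exact for the
-- m ≥ 1 admitted by Pre_; the pyGetD defaults are never used: inside the loop
-- 0 ≤ s-1 < f.length and 0 ≤ s-1, s+m-1 < len(text).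
def text_fingerprint (text : String) (m : Int) (basis : Int) (r : Int) : List Int :=
  let chars := text.toList
  let b_power := pvPowMod basis (m - 1).toNat r
  let f0 := pvFingerprint (PySem.List.slice chars (some 0) (some m)) basis r
  (PySem.List.pyRange 1 ((chars.length : Int) - m + 1) 1).foldl
    (fun f s =>
      f ++ [PySem.Int.mod
              ((PySem.List.pyGetD f (s - 1) 0
                 - ((PySem.List.pyGetD chars (s - 1) 'A').toNat : Int) * b_power) * basis
               + ((PySem.List.pyGetD chars (s + m - 1) 'A').toNat : Int)) r])
    [f0]

-- ===== PORT B =====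
-- B's local 'horner': plain Horner accumulation, one final reduction modulo r
def pvHorner (window : List Char) (basis r : Int) : Int :=
  PySem.Int.mod (window.foldl (fun h ch => h * basis + (ch.toNat : Int)) 0) r

def text_fingerprint_alt (text : String) (m : Int) (basis : Int) (r : Int) : List Int :=
  let chars := text.toList
  (PySem.List.pyRange 0 (max 1 ((chars.length : Int) - m + 1)) 1).map
    (fun s => pvHorner (PySem.List.slice chars (some s) (some (s + m))) basis r)

-- ===== PRECONDITION & SPEC =====
-- Pre_ excludes r = 0 (A raises ValueError in pow, B ZeroDivisionError in %) and m ≤ 0,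
-- where A's pow(basis, m-1, r) raises ValueError unless basis is invertible mod r;
-- in that accidental invertible case A returns all-zero fingerprints of the empty
-- windows and B agrees with it even there (see cites), so nothing sensible is lost.
def Pre_text_fingerprint (text : String) (m : Int) (basis : Int) (r : Int) : Prop :=
  1 ≤ m ∧ r ≠ 0
instance (text : String) (m : Int) (basis : Int) (r : Int) : Decidable (Pre_text_fingerprint text m basis r) := by unfold Pre_text_fingerprint; infer_instance

def pvWitness_text_fingerprint : String × Int × Int × Int := ("abc", 2, 16, 101)

def Spec_text_fingerprint (text : String) (m : Int) (basis : Int) (r : Int) (out : List Int) : Prop := out = text_fingerprint_alt text m basis r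
instance (text : String) (m : Int) (basis : Int) (r : Int) (out : List Int) : Decidable (Spec_text_fingerprint text m basis r out) := by unfold Spec_text_fingerprint; infer_instance

-- ===== CLAIM (what is proved, stated in full; the proofs are below) =====
def Claim_equal_text_fingerprint : Prop := ∀ (text : String) (m : Int) (basis : Int) (r : Int), Dom_text_fingerprint text m basis r → Pre_text_fingerprint text m basis r → Spec_text_fingerprint text m basis r (text_fingerprint text m basis r)

-- ===== LEMMAS AND PROOFS =====

-- the unreduced Horner polynomial of a window
def pvP (basis : Int) (w : List Char) : Int :=
  w.foldl (fun a c => a * basis + (c.toNat : Int)) 0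

theorem pymod_congr {r a b : Int} (h : r ∣ (a - b)) :
    PySem.Int.mod a r = PySem.Int.mod b r := by
  rcases h with ⟨k, hk⟩
  have hab : a = b + r * k := by linarith
  simp [PySem.Int.mod, hab, Int.add_mul_fmod_self_left]

theorem horner_mod (basis r : Int) :
    ∀ (w : List Char) (a : Int),
    w.foldl (fun h ch => PySem.Int.mod (h * basis + (ch.toNat : Int)) r) (PySem.Int.mod a r)
      = PySem.Int.mod (w.foldl (fun h ch => h * basis + (ch.toNat : Int)) a) r := by
  intro w
  induction w with
  | nil => intro a; simp
  | cons c w ih =>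
    intro a
    simp only [List.foldl_cons]
    have hstep : PySem.Int.mod (PySem.Int.mod a r * basis + (c.toNat : Int)) r
        = PySem.Int.mod (a * basis + (c.toNat : Int)) r := by
      apply pymod_congr
      refine ⟨-(PySem.Int.floordiv a r) * basis, ?_⟩
      have hfa := PySem.Int.floordiv_mul_add_mod a r
      linear_combination basis * hfa
    rw [hstep, ih (a * basis + (c.toNat : Int))]

theorem pvFingerprint_eq_mod (w : List Char) (basis r : Int) :
    pvFingerprint w basis r = PySem.Int.mod (pvP basis w) r := by
  have h0 : PySem.Int.mod 0 r = 0 := by simp [PySem.Int.mod]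
  have := horner_mod basis r w 0
  rw [h0] at this
  exact this

theorem pvHorner_eq (w : List Char) (basis r : Int) :
    pvHorner w basis r = PySem.Int.mod (pvP basis w) r := rfl

theorem pvP_foldl (basis : Int) :
    ∀ (w : List Char) (a : Int),
    w.foldl (fun h ch => h * basis + (ch.toNat : Int)) a = a * basis ^ w.length + pvP basis w := by
  intro w
  induction w with
  | nil => intro a; simp [pvP]
  | cons c w ih =>
    intro a
    have hP : pvP basis (c :: w) = (c.toNat : Int) * basis ^ w.length + pvP basis w := by
      unfold pvP
      simp only [List.foldl_cons, zero_mul, zero_add]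
      rw [ih ((c.toNat : Int))]
      rfl
    simp only [List.foldl_cons, List.length_cons, hP]
    rw [ih (a * basis + (c.toNat : Int))]
    unfold pvP
    ring

theorem pvP_cons (basis : Int) (c : Char) (w : List Char) :
    pvP basis (c :: w) = (c.toNat : Int) * basis ^ w.length + pvP basis w := by
  unfold pvP
  simp only [List.foldl_cons, zero_mul, zero_add]
  rw [pvP_foldl basis w ((c.toNat : Int))]
  rfl

theorem pvP_append (basis : Int) (w : List Char) (d : Char) :
    pvP basis (w ++ [d]) = pvP basis w * basis + (d.toNat : Int) := by
  unfold pvP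
  rw [List.foldl_append]
  simp

-- the rolling recurrence computes the fresh Horner hash of the next window
theorem roll (L : List Char) (basis r : Int) (M t : Nat) (hM : 1 ≤ M)
    (hlt : t + M < L.length) :
    PySem.Int.mod
      ((pvFingerprint ((L.drop t).take M) basis r
          - ((L[t]'(by omega)).toNat : Int) * PySem.Int.mod (basis ^ (M - 1)) r) * basis
        + ((L[t + M]'(by omega)).toNat : Int)) r
      = pvFingerprint ((L.drop (t + 1)).take M) basis r := by
  obtain ⟨k, rfl⟩ : ∃ k, M = k + 1 := ⟨M - 1, by omega⟩
  have h1 : (L.drop t).take (k + 1) = L[t]'(by omega) :: ((L.drop (t + 1)).take k) := by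
    rw [List.drop_eq_getElem_cons (by omega), List.take_succ_cons]
  have hlen : ((L.drop (t + 1)).take k).length = k := by
    simp only [List.length_take, List.length_drop]; omega
  have h2 : (L.drop (t + 1)).take (k + 1) = ((L.drop (t + 1)).take k) ++ [L[t + 1 + k]'(by omega)] := by
    rw [List.take_add_one]
    rw [List.getElem?_drop, List.getElem?_eq_getElem (by omega)]
    rfl
  have hidx : t + (k + 1) = t + 1 + k := by omega
  rw [h1]
  simp only [hidx]
  rw [h2, pvFingerprint_eq_mod, pvFingerprint_eq_mod, pvP_cons, pvP_append, hlen]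
  have hsimp : k + 1 - 1 = k := by omega
  rw [hsimp]
  set c : Int := ((L[t]'(by omega)).toNat : Int)
  set d : Int := ((L[t + 1 + k]'(by omega)).toNat : Int)
  set P : Int := pvP basis ((L.drop (t + 1)).take k)
  apply pymod_congr
  have hf1 := PySem.Int.floordiv_mul_add_mod (c * basis ^ k + P) r
  have hf2 := PySem.Int.floordiv_mul_add_mod (basis ^ k) r
  refine ⟨(c * PySem.Int.floordiv (basis ^ k) r - PySem.Int.floordiv (c * basis ^ k + P) r) * basis, ?_⟩
  have hm1 : PySem.Int.mod (c * basis ^ k + P) r = (c * basis ^ k + P) - PySem.Int.floordiv (c * basis ^ k + P) r * r := by linarith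
  have hm2 : PySem.Int.mod (basis ^ k) r = basis ^ k - PySem.Int.floordiv (basis ^ k) r * r := by linarith
  rw [hm1, hm2]
  ring

theorem mod_sq_congr (r x : Int) :
    PySem.Int.mod (PySem.Int.mod x r * PySem.Int.mod x r) r = PySem.Int.mod (x * x) r := by
  apply pymod_congr
  have hf := PySem.Int.floordiv_mul_add_mod x r
  exact ⟨-(PySem.Int.floordiv x r * (x + PySem.Int.mod x r)),
    by linear_combination (x + PySem.Int.mod x r) * hf⟩

theorem mod_mul_left_congr (r x y : Int) :
    PySem.Int.mod (PySem.Int.mod x r * y) r = PySem.Int.mod (x * y) r := by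
  apply pymod_congr
  have hf := PySem.Int.floordiv_mul_add_mod x r
  exact ⟨-(PySem.Int.floordiv x r * y), by linear_combination y * hf⟩

theorem mod_sq_mul_congr (r x y : Int) :
    PySem.Int.mod (PySem.Int.mod x r * PySem.Int.mod x r * y) r = PySem.Int.mod (x * x * y) r := by
  apply pymod_congr
  have hf := PySem.Int.floordiv_mul_add_mod x r
  exact ⟨-(PySem.Int.floordiv x r * (x + PySem.Int.mod x r) * y),
    by linear_combination ((x + PySem.Int.mod x r) * y) * hf⟩

theorem pvPowMod_eq (b : Int) (r : Int) : ∀ e : Nat, pvPowMod b e r = PySem.Int.mod (b ^ e) r := by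
  intro e
  induction e using Nat.strong_induction_on with
  | _ e ih =>
    rw [pvPowMod]
    by_cases h0 : e = 0
    · simp [h0]
    · simp only [h0, dite_false]
      rw [ih (e / 2) (Nat.div_lt_self (Nat.pos_of_ne_zero h0) (by norm_num))]
      by_cases hp : e % 2 = 0
      · simp only [hp, if_true]
        rw [mod_sq_congr, ← pow_add, show e / 2 + e / 2 = e by omega]
      · simp only [hp, if_false]
        rw [mod_mul_left_congr, mod_sq_mul_congr]
        have : b ^ (e / 2) * b ^ (e / 2) * b = b ^ e := by
          rw [← pow_add, ← pow_succ, show e / 2 + e / 2 + 1 = e by omega]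
        rw [this]

-- A's fold over range(1, t+1) builds exactly the per-window Horner hashes 0..t
theorem loopA (L : List Char) (basis r : Int) (M : Nat) (hM : 1 ≤ M) (hMn : M ≤ L.length) :
    ∀ t : Nat, t ≤ L.length - M →
    (PySem.List.pyRange 1 ((t : Int) + 1)).foldl
      (fun f s => f ++ [PySem.Int.mod
              ((PySem.List.pyGetD f (s - 1) 0
                 - ((PySem.List.pyGetD L (s - 1) 'A').toNat : Int)
                     * PySem.Int.mod (basis ^ (M - 1)) r) * basis
               + ((PySem.List.pyGetD L (s + (M : Int) - 1) 'A').toNat : Int)) r])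
      [pvFingerprint (L.take M) basis r]
      = (List.range (t + 1)).map (fun k => pvFingerprint ((L.drop k).take M) basis r) := by
  intro t
  induction t with
  | zero =>
    intro _
    have hempty : PySem.List.pyRange 1 ((0 : Int) + 1) = [] := by
      simp [PySem.List.pyRange]
    simp only [Nat.cast_zero, hempty]
    simp
  | succ t ih =>
    intro ht
    have hrange : PySem.List.pyRange 1 ((t : Int) + 1 + 1)
        = PySem.List.pyRange 1 ((t : Int) + 1) ++ [(t : Int) + 1] :=
      PySem.List.pyRange_one_succ_right (by omega)
    have htt : (t : Nat) ≤ L.length - M := by omega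
    push_cast
    rw [hrange, List.foldl_append, ih htt]
    simp only [List.foldl_cons, List.foldl_nil]
    have e1 : ((t : Int) + 1) - 1 = ((t : Nat) : Int) := by push_cast; ring
    have e2 : ((t : Int) + 1) + (M : Int) - 1 = (((t + M : Nat)) : Int) := by push_cast; ring
    rw [e1, e2, PySem.List.pyGetD_natCast, PySem.List.pyGetD_natCast, PySem.List.pyGetD_natCast]
    have hg1 : (List.map (fun k => pvFingerprint ((L.drop k).take M) basis r) (List.range (t + 1))).getD t 0
        = pvFingerprint ((L.drop t).take M) basis r :=
      PySem.List.getD_map_range _ _ _ _ (by omega)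
    have hgl1 : L.getD t 'A' = L[t]'(by omega) := List.getD_eq_getElem L 'A' (by omega)
    have hgl2 : L.getD (t + M) 'A' = L[t + M]'(by omega) := List.getD_eq_getElem L 'A' (by omega)
    rw [hg1, hgl1, hgl2, roll L basis r M t hM (by omega)]
    conv_rhs => rw [List.range_succ]
    simp

theorem pyRange_empty (a b : Int) (h : b ≤ a) : PySem.List.pyRange a b = [] := by
  simp [PySem.List.pyRange]
  omega

-- ===== VERDICT (by name: the statement is the Claim_ definition above) =====
theorem text_fingerprint_spec : Claim_equal_text_fingerprint := by
  intro text m basis r _ hPre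
  unfold Spec_text_fingerprint
  have hm1 : 1 ≤ m := hPre.1
  set L := text.toList with hL
  by_cases hmn : m ≤ (L.length : Int)
  · -- m fits in the text: rolling fold = per-window map, via loopA
    set M : Nat := m.toNat with hMdef
    have hm : m = (M : Int) := by omega
    have hM1 : 1 ≤ M := by omega
    have hMn : M ≤ L.length := by omega
    set N : Nat := L.length - M with hN
    have hcast : (L.length : Int) - m + 1 = ((N : Int) + 1) := by omega
    have hmax : max 1 (((N : Int)) + 1) = ((N : Int) + 1) := by omega
    have hpow : (m - 1).toNat = M - 1 := by omega
    unfold text_fingerprint text_fingerprint_alt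
    simp only [← hL, hcast, hmax, hpow]
    -- A side
    have hslice0 : PySem.List.slice L (some 0) (some m) = L.take M := by
      rw [PySem.List.slice_zero_start, PySem.List.slice_to L (by omega)]
    have hA : (PySem.List.pyRange 1 ((N : Int) + 1)).foldl
        (fun f s => f ++ [PySem.Int.mod
                ((PySem.List.pyGetD f (s - 1) 0
                   - ((PySem.List.pyGetD L (s - 1) 'A').toNat : Int)
                       * pvPowMod basis (M - 1) r) * basis
                 + ((PySem.List.pyGetD L (s + m - 1) 'A').toNat : Int)) r])
        [pvFingerprint (PySem.List.slice L (some 0) (some m)) basis r]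
        = (List.range (N + 1)).map (fun k => pvFingerprint ((L.drop k).take M) basis r) := by
      rw [hslice0]
      have := loopA L basis r M hM1 hMn N (le_refl N)
      rw [hm]
      rw [pvPowMod_eq]
      exact this
    rw [hA]
    -- B side
    have hB : PySem.List.pyRange 0 ((N : Int) + 1)
        = (List.range (N + 1)).map (fun k : Nat => (k : Int)) := by
      exact_mod_cast PySem.List.pyRange_zero_natCast (N + 1)
    rw [hB, List.map_map]
    apply List.map_congr_left
    intro k hk
    simp only [Function.comp_apply]
    have : PySem.List.slice L (some (k : Int)) (some ((k : Int) + m)) = (L.drop k).take M := by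
      rw [hm]
      exact_mod_cast PySem.List.slice_natCast_add L k M
    rw [this, pvHorner_eq, ← pvFingerprint_eq_mod]
  · -- m exceeds the text: both return the single truncated-window hash
    unfold text_fingerprint text_fingerprint_alt
    simp only [← hL]
    have hA : PySem.List.pyRange 1 ((L.length : Int) - m + 1) = [] :=
      pyRange_empty _ _ (by omega)
    have hmax : max 1 ((L.length : Int) - m + 1) = 1 := by omega
    have hB : PySem.List.pyRange 0 (1 : Int) = [(0 : Int)] := by decide
    rw [hA, hmax, hB]
    simp only [List.foldl_nil, List.map_cons, List.map_nil, zero_add]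
    rw [pvHorner_eq, ← pvFingerprint_eq_mod]
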